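-- pv_equiv track=rewrite | github.com/jantibur/boss-johnny | pages/🧾 Splitter.py | distribute_splitted_sold_dictionaries
-- ===== SOURCE A (Python) =====
-- def distribute_splitted_sold_dictionaries(number_of_split, splitted_sold_dictionaries):
--     distributed_splitted_product_sold = []
--
--     for i in range(number_of_split):
--         distributed_products = []
--
--         for product in range(len(splitted_sold_dictionaries)):
--             if splitted_sold_dictionaries[product] == None:
--                 continue
--
--             for product_size in splitted_sold_dictionaries[product]:
--                 distributed_products.append(product_size[i])
--
--         distributed_splitted_product_sold.append(distributed_products)
--
--     return distributed_splitted_product_sold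
-- ===== SOURCE B (Python) =====
-- def distribute_splitted_sold_dictionaries(number_of_split, splitted_sold_dictionaries):
--     n = number_of_split
--     flat = [x
--             for product in splitted_sold_dictionaries
--             if product is not None
--             for row in product
--             for x in row[:n]]
--     return [flat[s::n] for s in range(n)]
-- ===== Notes on version B (the rewrite author's own statement) =====
-- stated objective: alternative
-- what changed: B flattens all rows of non-None products (each truncated to n entries) into one flat row-major buffer in a single comprehension and recovers each per-split list by stride slicing flat[s::n], instead of A's triple nested loop that rescans the whole structure once per split index.
import Mathlib
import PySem

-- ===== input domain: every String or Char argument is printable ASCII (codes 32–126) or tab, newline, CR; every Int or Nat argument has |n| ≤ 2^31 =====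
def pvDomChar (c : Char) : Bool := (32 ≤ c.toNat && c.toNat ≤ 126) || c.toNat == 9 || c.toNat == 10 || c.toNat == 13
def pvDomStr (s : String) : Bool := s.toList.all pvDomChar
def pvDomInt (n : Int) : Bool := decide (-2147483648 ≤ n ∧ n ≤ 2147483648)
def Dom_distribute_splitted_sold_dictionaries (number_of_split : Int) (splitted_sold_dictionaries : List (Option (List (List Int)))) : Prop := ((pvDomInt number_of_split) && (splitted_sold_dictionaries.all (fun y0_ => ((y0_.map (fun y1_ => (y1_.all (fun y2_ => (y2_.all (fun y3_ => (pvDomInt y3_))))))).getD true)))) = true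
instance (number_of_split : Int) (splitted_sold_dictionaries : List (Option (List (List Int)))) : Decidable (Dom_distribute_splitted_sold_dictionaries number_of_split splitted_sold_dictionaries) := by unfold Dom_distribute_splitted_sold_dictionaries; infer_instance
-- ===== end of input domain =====

-- B flattens all (non-None) rows row-major into one flat buffer and extracts each per-split
-- list by stride slicing flat[s::n], instead of A's full rescan of the structure per split index
-- (objective: alternative; return values proved equal on Pre_).

-- ===== PORT A =====
-- A: for each split index i, scan every (non-None) product and collect row[i].
-- Row indexing row[i] is in range under Pre_; the port totalises pyGet? with .getD 0.
def distribute_splitted_sold_dictionaries (number_of_split : Int) (splitted_sold_dictionaries : List (Option (List (List Int)))) : List (List Int) :=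
  (PySem.List.pyRange 0 number_of_split 1).foldl (fun acc i =>
    acc ++ [splitted_sold_dictionaries.foldl (fun dp prod =>
      match prod with
      | none => dp
      | some rows => rows.foldl (fun dp2 row => dp2 ++ [(PySem.List.pyGet? row i).getD 0]) dp) []]) []

-- ===== PORT B =====
-- flat = [x for p in xs if p is not None for row in p for x in row[:n]]; return [flat[s::n] for s in range(n)]
-- slice? is none only for step 0; inside the map the step n is positive, so .getD [] never fires.
def distribute_splitted_sold_dictionaries_alt (number_of_split : Int) (splitted_sold_dictionaries : List (Option (List (List Int)))) : List (List Int) :=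
  let flat := splitted_sold_dictionaries.flatMap (fun p =>
    match p with
    | none => []
    | some rows => rows.flatMap (fun row => PySem.List.slice row none (some number_of_split)))
  (PySem.List.pyRange 0 number_of_split 1).map (fun s =>
    (PySem.List.slice? flat (some s) none number_of_split).getD [])

-- ===== PRECONDITION & SPEC =====
-- Pre_ excludes exactly the inputs where Python A raises IndexError: number_of_split > 0
-- with some row of a non-None product shorter than number_of_split.
def Pre_distribute_splitted_sold_dictionaries (number_of_split : Int) (splitted_sold_dictionaries : List (Option (List (List Int)))) : Prop :=
  number_of_split ≤ 0 ∨ ∀ p ∈ splitted_sold_dictionaries, ∀ row ∈ p.getD [], number_of_split ≤ (row.length : Int)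
instance (number_of_split : Int) (splitted_sold_dictionaries : List (Option (List (List Int)))) : Decidable (Pre_distribute_splitted_sold_dictionaries number_of_split splitted_sold_dictionaries) := by unfold Pre_distribute_splitted_sold_dictionaries; infer_instance

def pvWitness_distribute_splitted_sold_dictionaries : Int × List (Option (List (List Int))) := (2, [some [[1, 2], [3, 4]], none])

def Spec_distribute_splitted_sold_dictionaries (number_of_split : Int) (splitted_sold_dictionaries : List (Option (List (List Int)))) (out : List (List Int)) : Prop := out = distribute_splitted_sold_dictionaries_alt number_of_split splitted_sold_dictionaries
instance (number_of_split : Int) (splitted_sold_dictionaries : List (Option (List (List Int)))) (out : List (List Int)) : Decidable (Spec_distribute_splitted_sold_dictionaries number_of_split splitted_sold_dictionaries out) := by unfold Spec_distribute_splitted_sold_dictionaries; infer_instance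

-- ===== CLAIM =====
def Claim_equal_distribute_splitted_sold_dictionaries : Prop := ∀ (number_of_split : Int) (splitted_sold_dictionaries : List (Option (List (List Int)))), Dom_distribute_splitted_sold_dictionaries number_of_split splitted_sold_dictionaries → Pre_distribute_splitted_sold_dictionaries number_of_split splitted_sold_dictionaries → Spec_distribute_splitted_sold_dictionaries number_of_split splitted_sold_dictionaries (distribute_splitted_sold_dictionaries number_of_split splitted_sold_dictionaries)

-- ===== LEMMAS AND PROOFS =====

-- the i-th column of the whole structure (A's inner result)
def pvCol (xs : List (Option (List (List Int)))) (i : Int) : List Int :=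
  xs.flatMap (fun p => (p.getD []).map (fun row => (PySem.List.pyGet? row i).getD 0))

-- all rows of non-None products, in order
def pvRows (xs : List (Option (List (List Int)))) : List (List Int) :=
  xs.flatMap (fun p => p.getD [])

lemma pvA_inner (xs : List (Option (List (List Int)))) (i : Int) :
    ∀ acc, xs.foldl (fun dp prod =>
      match prod with
      | none => dp
      | some rows => rows.foldl (fun dp2 row => dp2 ++ [(PySem.List.pyGet? row i).getD 0]) dp) acc
      = acc ++ pvCol xs i := by
  induction xs with
  | nil => intro acc; simp [pvCol]
  | cons p xs ih =>
    intro acc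
    cases p with
    | none =>
      rw [List.foldl_cons]
      show (xs.foldl _ acc) = _
      rw [ih]
      simp [pvCol]
    | some rows =>
      rw [List.foldl_cons]
      show (xs.foldl _ (rows.foldl _ acc)) = _
      rw [ih, PySem.List.foldl_append_singleton_eq_map]
      simp [pvCol]

lemma pvA_eq (n : Int) (xs : List (Option (List (List Int)))) :
    distribute_splitted_sold_dictionaries n xs
      = (PySem.List.pyRange 0 n 1).map (fun i => pvCol xs i) := by
  unfold distribute_splitted_sold_dictionaries
  simp only [pvA_inner]
  simp only [PySem.List.foldl_append_singleton_eq_map, List.nil_append]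

lemma pvCol_rows (xs : List (Option (List (List Int)))) (i : Int) :
    pvCol xs i = (pvRows xs).map (fun row => (PySem.List.pyGet? row i).getD 0) := by
  simp [pvCol, pvRows, List.map_flatMap]

lemma pvFlat_rows (n : Int) (xs : List (Option (List (List Int)))) :
    xs.flatMap (fun p =>
      match p with
      | none => []
      | some rows => rows.flatMap (fun row => PySem.List.slice row none (some n)))
    = ((pvRows xs).map (fun row => PySem.List.slice row none (some n))).flatten := by
  rw [← List.flatMap_def, pvRows, List.flatMap_assoc]
  congr 1
  funext p
  cases p <;> rfl

-- blocks.flatten[σ + m*k]? hits entry σ of block k when every block has length m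
lemma pvFlatGet (m σ : Nat) (hσ : σ < m) :
    ∀ (blocks : List (List Int)), (∀ b ∈ blocks, b.length = m) →
      ∀ k, k < blocks.length →
        blocks.flatten[σ + m * k]? = some ((blocks.getD k []).getD σ 0) := by
  intro blocks
  induction blocks with
  | nil => intro _ k hk; simp at hk
  | cons b bs ih =>
    intro hb k hk
    have hbl : b.length = m := hb b (by simp)
    cases k with
    | zero =>
      simp only [Nat.mul_zero, Nat.add_zero, List.flatten_cons, List.getD_cons_zero]
      rw [List.getElem?_append_left (by omega)]
      rw [List.getElem?_eq_getElem (by omega), List.getD_eq_getElem b 0 (by omega)]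
    | succ k =>
      simp only [List.flatten_cons, List.getD_cons_succ]
      rw [List.getElem?_append_right (by nlinarith)]
      have : σ + m * (k + 1) - b.length = σ + m * k := by
        rw [hbl]; ring_nf; omega
      rw [this]
      exact ih (fun x hx => hb x (by simp [hx])) k (by simpa using hk)

-- stride slice of a flat buffer made of uniform blocks of length m = one entry per block
lemma pvStride (m σ : Nat) (hσ : σ < m) (blocks : List (List Int))
    (hb : ∀ b ∈ blocks, b.length = m) :
    PySem.List.slice? blocks.flatten (some (σ : Int)) none (m : Int)
      = some (blocks.map (fun b => b.getD σ 0)) := by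
  have hm0 : ((m:Int)) ≠ 0 := by omega
  have h1 : ¬ ((m:Int) < 0) := by omega
  have h2 : ¬ ((σ:Int) < 0) := by omega
  have hlen : blocks.flatten.length = blocks.length * m := by
    rw [List.length_flatten]
    rw [List.map_congr_left hb, List.map_const', List.sum_replicate, smul_eq_mul]
  simp only [PySem.List.slice?, PySem.List.sliceIndices, if_neg hm0, if_neg h1, if_neg h2]
  by_cases hnil : blocks = []
  · subst hnil; simp
  · have hL : 0 < blocks.length := List.length_pos_iff.mpr hnil
    have hmin : min (σ:Int) (blocks.flatten.length : Int) = σ := by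
      rw [hlen]; push_cast; have : m ≤ blocks.length * m := Nat.le_mul_of_pos_left m hL
      omega
    rw [hmin]
    have hlt : (σ:Int) < (blocks.flatten.length:Int) := by
      rw [hlen]; push_cast
      have : m ≤ blocks.length * m := Nat.le_mul_of_pos_left m hL
      omega
    rw [if_pos (by exact_mod_cast Nat.pos_of_ne_zero (by omega) : (0:Int) < m), if_pos hlt]
    have hcount : (((blocks.flatten.length:Int) - σ + m - 1) / m).toNat = blocks.length := by
      rw [hlen]; push_cast
      have he : ((blocks.length:Int) * m - σ + m - 1) = ((m:Int) - 1 - σ) + blocks.length * m := by ring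
      rw [he, Int.add_mul_ediv_right _ _ hm0, Int.ediv_eq_zero_of_lt (by omega) (by omega)]
      omega
    rw [hcount]
    have hcg : ∀ k ∈ List.range blocks.length,
        blocks.flatten[((σ:Int) + (m:Int) * (k:Int)).toNat]?
          = some ((blocks.getD k []).getD σ 0) := by
      intro k hk
      have hkL := List.mem_range.mp hk
      have htn : (((σ:Int)) + (m:Int) * (k:Int)).toNat = σ + m * k := by
        have h3 : ((σ:Int)) + (m:Int) * (k:Int) = ((σ + m * k : Nat) : Int) := by push_cast; ring
        rw [h3, Int.toNat_natCast]
      rw [htn]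
      exact pvFlatGet m σ hσ blocks hb k hkL
    rw [List.filterMap_congr hcg, show (fun x => some ((blocks.getD x []).getD σ 0)) = some ∘ (fun x => (blocks.getD x []).getD σ 0) from rfl, List.filterMap_eq_map]
    congr 1
    apply List.ext_getElem
    · simp
    · intro j hj1 hj2
      simp only [List.getElem_map, List.getElem_range]
      have hjL : j < blocks.length := by simpa using hj1
      rw [List.getD_eq_getElem blocks [] hjL]

-- per-column agreement
lemma pvColEq (n : Int) (hn : 0 < n) (s : Int) (h0 : 0 ≤ s) (hs : s < n)
    (rows : List (List Int)) (hr : ∀ r ∈ rows, n ≤ (r.length : Int)) :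
    (PySem.List.slice? ((rows.map (fun row => PySem.List.slice row none (some n))).flatten)
        (some s) none n).getD []
      = rows.map (fun row => (PySem.List.pyGet? row s).getD 0) := by
  have hb : ∀ b ∈ rows.map (fun row => PySem.List.slice row none (some n)), b.length = n.toNat := by
    intro b hbm
    rcases List.mem_map.mp hbm with ⟨row, hrow, rfl⟩
    rw [PySem.List.slice_to row (le_of_lt hn), List.length_take]
    have := hr row hrow
    omega
  have hσ : s.toNat < n.toNat := by omega
  have hst := pvStride n.toNat s.toNat hσ _ hb
  rw [Int.toNat_of_nonneg h0, Int.toNat_of_nonneg (le_of_lt hn)] at hst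
  rw [hst, Option.getD_some, List.map_map]
  apply List.map_congr_left
  intro row hrow
  have hlen := hr row hrow
  simp only [Function.comp]
  rw [PySem.List.slice_to row (le_of_lt hn)]
  rw [← Int.toNat_of_nonneg h0, PySem.List.pyGet?_natCast]
  rw [List.getD_eq_getElem?_getD, List.getElem?_take_of_lt (by omega)]
  rw [Int.toNat_natCast]

-- ===== VERDICT =====
theorem distribute_splitted_sold_dictionaries_spec : Claim_equal_distribute_splitted_sold_dictionaries := by
  intro n xs _ pre
  unfold Spec_distribute_splitted_sold_dictionaries distribute_splitted_sold_dictionaries_alt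
  rw [pvA_eq]
  simp only [pvFlat_rows]
  rcases le_or_gt n 0 with h | h
  · rw [PySem.List.pyRange_one_eq_nil h]; rfl
  · have hr : ∀ r ∈ pvRows xs, n ≤ (r.length : Int) := by
      intro r hrm
      rcases pre with h' | h'
      · omega
      · rcases List.mem_flatMap.mp hrm with ⟨p, hp, hr2⟩
        exact h' p hp r hr2
    apply List.map_congr_left
    intro s hsmem
    rw [PySem.List.mem_pyRange_one] at hsmem
    rw [pvCol_rows, pvColEq n h s hsmem.1 hsmem.2 (pvRows xs) hr]
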